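-- pv_equiv track=rewrite | github.com/SaHeinem/denog-talk | company2url/companies_to_domains.py | pick_preferred
-- ===== SOURCE A (Python) =====
-- def pick_preferred(domains: list[str], country: str | None) -> str | None:
--     if not domains:
--         return None
--     preferred_suffixes = [".com"]
--     if country:
--         preferred_suffixes.append(f".{country.lower()}")
--     seen_suffixes = set()
--     ordered_suffixes = []
--     for suffix in preferred_suffixes:
--         if suffix not in seen_suffixes:
--             ordered_suffixes.append(suffix)
--             seen_suffixes.add(suffix)
--     for suffix in ordered_suffixes:
--         for d in domains:
--             if d.lower().endswith(suffix):
--                 return d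
--     return domains[0]
-- ===== SOURCE B (Python) =====
-- def pick_preferred(domains: list[str], country: str | None) -> str | None:
--     if not domains:
--         return None
--     suffixes = [".com"]
--     if country:
--         s = "." + country.lower()
--         if s != ".com":
--             suffixes.append(s)
--     best = None
--     best_i = len(suffixes)
--     for d in domains:
--         dl = d.lower()
--         for i in range(best_i):
--             if dl.endswith(suffixes[i]):
--                 best, best_i = d, i
--                 break
--     return best if best is not None else domains[0]
-- ===== Notes on version B (the rewrite author's own statement) =====
-- stated objective: alternative
-- what changed: B makes a single pass over the domain list tracking the best (lowest-index) matching suffix priority per domain, instead of A's rescan of the whole domain list once per suffix; the dedup set/loop collapses into one inequality check.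
import Mathlib
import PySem

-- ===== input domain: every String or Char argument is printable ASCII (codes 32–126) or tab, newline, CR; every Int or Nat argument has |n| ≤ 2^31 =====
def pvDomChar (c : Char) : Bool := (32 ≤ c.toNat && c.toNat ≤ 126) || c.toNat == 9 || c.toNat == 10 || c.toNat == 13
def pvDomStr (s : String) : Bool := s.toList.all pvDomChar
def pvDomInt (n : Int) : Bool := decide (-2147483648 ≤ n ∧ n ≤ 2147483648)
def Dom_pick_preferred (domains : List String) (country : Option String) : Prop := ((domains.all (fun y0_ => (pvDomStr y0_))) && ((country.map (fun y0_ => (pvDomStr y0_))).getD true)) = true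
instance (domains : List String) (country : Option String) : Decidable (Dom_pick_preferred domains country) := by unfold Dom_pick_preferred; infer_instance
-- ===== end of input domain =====

-- B replaces A's per-suffix rescan of the domain list by one pass over the domains
-- tracking the best (lowest-index) matching suffix; alternative decomposition, same cost.

-- ===== PORT A =====
-- the nested 'for suffix in ordered_suffixes: for d in domains: if …: return d' loops
def pick_preferred_scan (domains : List String) (suffixes : List String) : Option String :=
  match suffixes with
  | [] => none
  | s :: rest =>
    match domains.find? (fun d => PySem.Str.endswith (PySem.Str.lower d) s) with
    | some d => some d
    | none => pick_preferred_scan domains rest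

def pick_preferred (domains : List String) (country : Option String) : Option String :=
  if domains = [] then none
  else
    let preferred_suffixes : List String :=
      [".com"] ++ (match country with
        | some c => if c ≠ "" then ["." ++ PySem.Str.lower c] else []
        | none => [])
    let ordered := (preferred_suffixes.foldl
      (fun (st : PySem.Set String × List String) suffix =>
        if PySem.Set.contains st.1 suffix then st
        else (PySem.Set.add st.1 suffix, st.2 ++ [suffix]))
      (PySem.Set.empty, [])).2
    match pick_preferred_scan domains ordered with
    | some d => some d
    | none => PySem.List.pyGet? domains 0

-- ===== PORT B =====
-- B's inner 'for i in range(best_i): if dl.endswith(suffixes[i]): …; break'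
def pick_preferred_alt_step (suffixes : List String) (st : Option String × Nat) (d : String) : Option String × Nat :=
  match (suffixes.take st.2).findIdx? (fun s => PySem.Str.endswith (PySem.Str.lower d) s) with
  | some i => (some d, i)
  | none => st

def pick_preferred_alt (domains : List String) (country : Option String) : Option String :=
  if domains = [] then none
  else
    let suffixes : List String :=
      match country with
      | some c =>
        if c ≠ "" then
          let s := "." ++ PySem.Str.lower c
          if s ≠ ".com" then [".com", s] else [".com"]
        else [".com"]
      | none => [".com"]
    let st := domains.foldl (pick_preferred_alt_step suffixes) (none, suffixes.length)
    match st.1 with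
    | some d => some d
    | none => PySem.List.pyGet? domains 0

-- ===== PRECONDITION & SPEC =====
def Spec_pick_preferred (domains : List String) (country : Option String) (out : Option String) : Prop := out = pick_preferred_alt domains country
instance (domains : List String) (country : Option String) (out : Option String) : Decidable (Spec_pick_preferred domains country out) := by unfold Spec_pick_preferred; infer_instance

-- ===== CLAIM (what is proved, stated in full; the proofs are below) =====
def Claim_equal_pick_preferred : Prop := ∀ (domains : List String) (country : Option String), Dom_pick_preferred domains country → Spec_pick_preferred domains country (pick_preferred domains country)

-- ===== LEMMAS AND PROOFS =====

-- bound 0: the fold state is absorbing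
theorem altstep_zero (suffixes : List String) (ds : List String) (d : String) :
    ds.foldl (pick_preferred_alt_step suffixes) (some d, 0) = (some d, 0) := by
  induction ds with
  | nil => rfl
  | cons x xs ih => simpa [pick_preferred_alt_step] using ih

-- one suffix: the fold finds the first matching domain
theorem altfold_one (s1 : String) (ds : List String) :
    (ds.foldl (pick_preferred_alt_step [s1]) (none, 1)).1
      = ds.find? (fun d => PySem.Str.endswith (PySem.Str.lower d) s1) := by
  induction ds with
  | nil => rfl
  | cons x xs ih =>
    by_cases h : PySem.Chars.endswith (PySem.Chars.lower x.toList) s1.toList = true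
    · simp [pick_preferred_alt_step, List.find?_cons, h, List.findIdx?_cons, altstep_zero]
    · simp [pick_preferred_alt_step, List.find?_cons, h, List.findIdx?_cons, ih]

-- two suffixes, a second-choice already in hand
theorem altfold_two_one (s1 s2 : String) (d : String) (ds : List String) :
    (ds.foldl (pick_preferred_alt_step [s1, s2]) (some d, 1)).1
      = match ds.find? (fun x => PySem.Str.endswith (PySem.Str.lower x) s1) with
        | some x => some x
        | none => some d := by
  induction ds generalizing d with
  | nil => rfl
  | cons x xs ih =>
    by_cases h1 : PySem.Chars.endswith (PySem.Chars.lower x.toList) s1.toList = true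
    · simp [pick_preferred_alt_step, List.find?_cons, h1, List.findIdx?_cons, altstep_zero]
    · simp [pick_preferred_alt_step, List.find?_cons, h1, List.findIdx?_cons, ih]

-- two suffixes from scratch
theorem altfold_two (s1 s2 : String) (ds : List String) :
    (ds.foldl (pick_preferred_alt_step [s1, s2]) (none, 2)).1
      = match ds.find? (fun x => PySem.Str.endswith (PySem.Str.lower x) s1) with
        | some x => some x
        | none => ds.find? (fun x => PySem.Str.endswith (PySem.Str.lower x) s2) := by
  induction ds with
  | nil => rfl
  | cons x xs ih =>
    by_cases h1 : PySem.Chars.endswith (PySem.Chars.lower x.toList) s1.toList = true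
    · simp [pick_preferred_alt_step, List.find?_cons, h1, List.findIdx?_cons, altstep_zero]
    · by_cases h2 : PySem.Chars.endswith (PySem.Chars.lower x.toList) s2.toList = true
      · simp [pick_preferred_alt_step, h1, h2, List.findIdx?_cons, altfold_two_one]
      · simp [pick_preferred_alt_step, h1, h2, List.findIdx?_cons, ih]

theorem scan_one (ds : List String) (s1 : String) :
    pick_preferred_scan ds [s1]
      = ds.find? (fun d => PySem.Str.endswith (PySem.Str.lower d) s1) := by
  simp only [pick_preferred_scan]
  cases ds.find? (fun d => PySem.Str.endswith (PySem.Str.lower d) s1) <;> rfl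

theorem scan_two (ds : List String) (s1 s2 : String) :
    pick_preferred_scan ds [s1, s2]
      = match ds.find? (fun x => PySem.Str.endswith (PySem.Str.lower x) s1) with
        | some x => some x
        | none => ds.find? (fun x => PySem.Str.endswith (PySem.Str.lower x) s2) := by
  rw [pick_preferred_scan, scan_one]

-- ===== VERDICT (by name: the statement is the Claim_ definition above) =====
theorem pick_preferred_spec : Claim_equal_pick_preferred := by
  intro domains country _
  unfold Spec_pick_preferred pick_preferred pick_preferred_alt
  by_cases hd : domains = []
  · simp [hd]
  · simp only [hd, if_false]
    cases country with
    | none =>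
      simp [List.foldl, PySem.Set.contains, PySem.Set.empty, PySem.Set.add,
            scan_one, altfold_one]
    | some c =>
      by_cases hc : c = ""
      · simp [hc, List.foldl, PySem.Set.contains, PySem.Set.empty, PySem.Set.add,
              scan_one, altfold_one]
      · by_cases hs : ("." ++ PySem.Str.lower c) = ".com"
        · simp [hc, hs, List.foldl, PySem.Set.contains, PySem.Set.empty, PySem.Set.add,
                scan_one, altfold_one]
        · simp [hc, hs, List.foldl, PySem.Set.contains, PySem.Set.empty, PySem.Set.add,
                scan_two, altfold_two]
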